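-- pv_equiv track=rewrite | github.com/telewizoor/remoteRadioControl | remoteControl/remoteControl.py | s_meter_label
-- ===== SOURCE A (Python) =====
-- def s_meter_label(val: int) -> str:
--     """
--     Mapping raw RM0 value (0-255) to S-meter scale.
--     Uses calibration table with linear interpolation.
--     """
--     # table: raw_value : label
--     cal_table = [
--         (0, "S0"),
--         (20, "S1"),
--         (40, "S3"),
--         (53, "S4"),
--         (75, "S5"),
--         (88, "S6"),
--         (110, "S7"),
--         (155, "S9"),
--         (165, "+10"),
--         (190, "+20"),
--         (220, "+40"),
--         (255, "+60"),
--     ]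
--
--     # if exact match
--     for raw, label in cal_table:
--         if val == raw:
--             return label
--
--     # interpolation: find interval
--     for i in range(len(cal_table)-1):
--         raw1, lab1 = cal_table[i]
--         raw2, lab2 = cal_table[i+1]
--         if raw1 <= val <= raw2:
--             return lab1  # for simplicity return lower threshold
--             # could also add interpolation e.g. "S6"
--     return "S?"
-- ===== SOURCE B (Python) =====
-- def s_meter_label(val: int) -> str:
--     """Single accumulator scan: return label of largest raw threshold <= val."""
--     cal_table = [
--         (0, "S0"), (20, "S1"), (40, "S3"), (53, "S4"),
--         (75, "S5"), (88, "S6"), (110, "S7"), (155, "S9"),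
--         (165, "+10"), (190, "+20"), (220, "+40"), (255, "+60"),
--     ]
--     if val < 0 or val > 255:
--         return "S?"
--     res = "S?"
--     for raw, label in cal_table:
--         if raw <= val:
--             res = label
--         else:
--             break
--     return res
-- ===== Notes on version B (the rewrite author's own statement) =====
-- stated objective: simpler
-- what changed: Replaced A's two separate passes (exact-match pass plus adjacent-pair interval search) by a single accumulator scan that, after an out-of-range guard, keeps the label of the largest threshold <= val.
import Mathlib
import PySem

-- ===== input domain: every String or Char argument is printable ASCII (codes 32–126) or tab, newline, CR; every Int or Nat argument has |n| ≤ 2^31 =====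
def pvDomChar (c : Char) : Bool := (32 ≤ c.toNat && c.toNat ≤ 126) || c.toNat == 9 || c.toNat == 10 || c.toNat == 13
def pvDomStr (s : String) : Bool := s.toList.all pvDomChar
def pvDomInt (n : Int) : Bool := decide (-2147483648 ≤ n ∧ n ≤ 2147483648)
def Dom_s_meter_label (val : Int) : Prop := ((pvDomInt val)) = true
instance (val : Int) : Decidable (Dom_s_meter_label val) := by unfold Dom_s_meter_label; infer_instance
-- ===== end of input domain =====

-- B replaces A's two passes (exact match, then interval search) by one accumulator scan; objective: simpler.

-- ===== PORT A =====
def pvCalTable : List (Int × String) :=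
  [(0, "S0"), (20, "S1"), (40, "S3"), (53, "S4"),
   (75, "S5"), (88, "S6"), (110, "S7"), (155, "S9"),
   (165, "+10"), (190, "+20"), (220, "+40"), (255, "+60")]

-- first loop of A: exact match
def pvExact (val : Int) : List (Int × String) → Option String
  | [] => none
  | (raw, label) :: rest => if val = raw then some label else pvExact val rest

-- second loop of A: scan adjacent pairs cal_table[i], cal_table[i+1]
def pvInterp (val : Int) : List (Int × String) → String
  | (raw1, lab1) :: (raw2, lab2) :: rest =>
      if raw1 ≤ val ∧ val ≤ raw2 then lab1 else pvInterp val ((raw2, lab2) :: rest)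
  | _ => "S?"

def s_meter_label (val : Int) : String :=
  match pvExact val pvCalTable with
  | some label => label
  | none => pvInterp val pvCalTable

-- ===== PORT B =====
-- B's loop: keep the label of each threshold ≤ val, break at the first larger one
def pvScan (val : Int) (res : String) : List (Int × String) → String
  | [] => res
  | (raw, label) :: rest => if raw ≤ val then pvScan val label rest else res

def s_meter_label_alt (val : Int) : String :=
  if val < 0 ∨ val > 255 then "S?" else pvScan val "S?" pvCalTable

-- ===== PRECONDITION & SPEC =====
def Spec_s_meter_label (val : Int) (out : String) : Prop := out = s_meter_label_alt val
instance (val : Int) (out : String) : Decidable (Spec_s_meter_label val out) := by unfold Spec_s_meter_label; infer_instance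

-- ===== CLAIM (what is proved, stated in full; the proofs are below) =====
def Claim_equal_s_meter_label : Prop := ∀ (val : Int), Dom_s_meter_label val → Spec_s_meter_label val (s_meter_label val)

-- ===== LEMMAS AND PROOFS =====

set_option maxRecDepth 4000 in
set_option maxHeartbeats 1000000 in
theorem pv_in_range : ∀ n : Nat, n < 256 → s_meter_label (n : Int) = s_meter_label_alt (n : Int) := by decide

set_option maxHeartbeats 1000000 in
theorem pv_exact_oob (val : Int) (h : val < 0 ∨ 255 < val) : pvExact val pvCalTable = none := by
  unfold pvCalTable
  simp only [pvExact]
  split_ifs <;> first | rfl | omega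

set_option maxHeartbeats 1000000 in
theorem pv_interp_oob (val : Int) (h : val < 0 ∨ 255 < val) : pvInterp val pvCalTable = "S?" := by
  unfold pvCalTable
  simp only [pvInterp]
  split_ifs <;> first | rfl | omega

-- ===== VERDICT (by name: the statement is the Claim_ definition above) =====
theorem s_meter_label_spec : Claim_equal_s_meter_label := by
  intro val _
  unfold Spec_s_meter_label
  by_cases h : 0 ≤ val ∧ val ≤ 255
  · have hv : val = ((val.toNat : Nat) : Int) := by omega
    rw [hv]
    exact pv_in_range val.toNat (by omega)
  · have h' : val < 0 ∨ 255 < val := by omega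
    unfold s_meter_label s_meter_label_alt
    rw [pv_exact_oob val h', if_pos (by omega : val < 0 ∨ val > 255)]
    exact pv_interp_oob val h'
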